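-- pv_equiv track=rewrite | github.com/jjyunlp/STAD | src/method/self_training.py | convert_inst_to_dict
-- ===== SOURCE A (Python) =====
-- def convert_inst_to_dict(insts):
--     rel2inst = {}
--     for inst in insts:
--         rel = inst['relation']
--         if rel not in rel2inst:
--             rel2inst[rel] = [inst]
--         else:
--             rel2inst[rel].append(inst)
--     return rel2inst
-- ===== SOURCE B (Python) =====
-- def convert_inst_to_dict(insts):
--     keys = list(dict.fromkeys(inst['relation'] for inst in insts))
--     return {rel: [inst for inst in insts if inst['relation'] == rel] for rel in keys}
-- ===== Notes on version B (the rewrite author's own statement) =====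
-- stated objective: alternative
-- what changed: B replaces A's single-pass dict-building loop (insert-or-append per element) with a two-phase decomposition: first collect the distinct relation keys in first-occurrence order via dict.fromkeys, then build each group by filtering the whole list per key in a dict comprehension.
import Mathlib
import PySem

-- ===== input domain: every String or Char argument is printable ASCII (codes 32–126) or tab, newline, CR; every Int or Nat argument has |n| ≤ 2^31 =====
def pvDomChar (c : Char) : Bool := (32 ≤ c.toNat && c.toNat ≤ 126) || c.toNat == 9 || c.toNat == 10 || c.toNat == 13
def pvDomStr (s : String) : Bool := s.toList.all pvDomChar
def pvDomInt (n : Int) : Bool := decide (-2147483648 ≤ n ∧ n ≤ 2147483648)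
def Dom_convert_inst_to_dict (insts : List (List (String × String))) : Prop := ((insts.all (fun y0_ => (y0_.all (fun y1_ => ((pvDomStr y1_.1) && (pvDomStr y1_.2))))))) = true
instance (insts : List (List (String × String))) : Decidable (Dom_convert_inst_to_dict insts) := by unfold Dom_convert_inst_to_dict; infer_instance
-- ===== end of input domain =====

-- B groups by distinct relation keys (first-occurrence order) + filter per key, instead of A's single insert-or-append dict loop; objective: alternative decomposition.

-- shared helper: inst['relation'] (total via default ""; Pre_ guarantees the key is present)
def pvRel (inst : List (String × String)) : String :=
  ((PySem.Dict.mk inst).get? "relation").getD ""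

-- ===== PORT A =====
def convert_inst_to_dict (insts : List (List (String × String))) : List (String × List (List (String × String))) :=
  (insts.foldl (fun rel2inst inst =>
      let rel := pvRel inst
      if !(rel2inst.contains rel) then rel2inst.insert rel [inst]
      else rel2inst.modify rel [] (· ++ [inst]))
    PySem.Dict.empty).items

-- ===== PORT B =====
def convert_inst_to_dict_alt (insts : List (List (String × String))) : List (String × List (List (String × String))) :=
  let keys := PySem.List.dedup (insts.map pvRel)
  keys.map (fun rel => (rel, insts.filter (fun inst => pvRel inst == rel)))

-- ===== PRECONDITION & SPEC =====
-- Pre_ excludes instances missing the 'relation' key, on which Python A (and B) raise KeyError.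
def Pre_convert_inst_to_dict (insts : List (List (String × String))) : Prop :=
  (insts.all (fun inst => ((PySem.Dict.mk inst).get? "relation").isSome)) = true
instance (insts : List (List (String × String))) : Decidable (Pre_convert_inst_to_dict insts) := by unfold Pre_convert_inst_to_dict; infer_instance
def pvWitness_convert_inst_to_dict : (List (List (String × String))) :=
  [[("relation", "a"), ("x", "1")], [("relation", "b")], [("relation", "a"), ("x", "2")]]

def Spec_convert_inst_to_dict (insts : List (List (String × String))) (out : List (String × List (List (String × String)))) : Prop := out = convert_inst_to_dict_alt insts
instance (insts : List (List (String × String))) (out : List (String × List (List (String × String)))) : Decidable (Spec_convert_inst_to_dict insts out) := by unfold Spec_convert_inst_to_dict; infer_instance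

-- ===== CLAIM (what is proved, stated in full; the proofs are below) =====
def Claim_equal_convert_inst_to_dict : Prop := ∀ (insts : List (List (String × String))), Dom_convert_inst_to_dict insts → Pre_convert_inst_to_dict insts → Spec_convert_inst_to_dict insts (convert_inst_to_dict insts)

-- ===== LEMMAS AND PROOFS =====

-- A's two branches are a single Python-style `modify` (insert-if-absent with default [])
lemma step_eq_modify (d : PySem.Dict String (List (List (String × String)))) (r : String)
    (inst : List (String × String)) :
    (if !(d.contains r) then d.insert r [inst] else d.modify r [] (· ++ [inst]))
      = d.modify r [] (· ++ [inst]) := by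
  by_cases h : d.contains r
  · simp [h]
  · simp only [h, Bool.not_false, if_true]
    simp [PySem.Dict.insert, PySem.Dict.modify, h]
    rw [PySem.Dict.getD_of_not_contains]
    simpa using h

-- ===== VERDICT (by name: the statement is the Claim_ definition above) =====
theorem convert_inst_to_dict_spec : Claim_equal_convert_inst_to_dict := by
  intro insts _ _
  show convert_inst_to_dict insts = convert_inst_to_dict_alt insts
  unfold convert_inst_to_dict convert_inst_to_dict_alt
  have hstep : insts.foldl (fun rel2inst inst =>
      let rel := pvRel inst
      if !(rel2inst.contains rel) then rel2inst.insert rel [inst]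
      else rel2inst.modify rel [] (· ++ [inst])) PySem.Dict.empty
    = (insts.map (fun inst => (pvRel inst, inst))).foldl
        (fun d p => d.modify p.1 [] (· ++ [p.2])) PySem.Dict.empty := by
    rw [List.foldl_map]
    exact PySem.List.foldl_congr_mem _ _ _ _ (fun d inst _ => step_eq_modify d (pvRel inst) inst)
  rw [hstep]
  set l := insts.map (fun inst => (pvRel inst, inst)) with hl
  set d := l.foldl (fun d p => d.modify p.1 [] (· ++ [p.2])) PySem.Dict.empty with hd
  have hnodup : d.keys.Nodup := by
    rw [hd]
    exact PySem.Dict.nodup_keys_foldl_modify_key l Prod.fst [] (fun d p => (· ++ [p.2])) _ (by simp)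
  have hkeys : d.keys = PySem.List.dedup (insts.map pvRel) := by
    rw [hd, PySem.Dict.keys_foldl_modify_key]
    simp [PySem.Set.update_eq_append_filter, hl, List.map_map]
    rfl
  rw [PySem.Dict.items_eq_map_keys d hnodup [], hkeys]
  apply List.map_congr_left
  intro k _
  have := PySem.Dict.getD_foldl_modify_append l PySem.Dict.empty k
  rw [hd, this]
  simp [hl, List.filter_map, List.map_map, Function.comp_def]
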